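-- pv_equiv track=rewrite | github.com/RobbeRDG/aimee | zap_reading.py | iszapreadable
-- ===== SOURCE A (Python) =====
-- import math
--
-- def iszapreadable(page_number_list):
--     # Directly return false if number of pages is odd
--     if len(page_number_list) % 2 != 0:
--         return False
--
--     # If power of two, check second construction method
--     if math.log2(len(page_number_list)).is_integer():
--         # Set the start index
--         idx = 0
--
--         # Initialize the next wanted page number
--         next_page_number = 1
--
--         # Set a break variable to get out of while loop when not zap readable using the second construction method
--         stop = False
--
--         while next_page_number <= len(page_number_list) and not stop:
--             # To be zap readable, subsequent page reads should have their page numbers in oder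
--             if (page_number_list[idx] == next_page_number):
--                 idx += next_page_number
--                 idx = idx % len(page_number_list)
--                 next_page_number += 1
--             else:
--                 stop = True
--
--         if not stop:
--             return True
--
--     # If number of pages is even, check first construction method
--     if len(page_number_list) % 2 == 0:
--         # Set a new break variable
--         stop = False
--
--         # Initialize the index
--         idx = 0
--
--         while idx != len(page_number_list) and not stop:
--             # If the index is in the first half of the list, the page number should be length - (idx*2+1)
--             if idx < len(page_number_list)/2:
--                 stop = False if (page_number_list[idx] == len(page_number_list) - (idx*2 + 1)) else True
--                 idx += 1
--
--             # If the index is in the second half of the list, the page number should be length - (idx-(length/2))*2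
--             elif idx >= len(page_number_list)/2:
--                 stop = False if (page_number_list[idx] == len(page_number_list) - (idx - (len(page_number_list)/2))*2) else True
--                 idx += 1
--
--         if not stop:
--             return True
--
--     return False
-- ===== SOURCE B (Python) =====
-- import math
--
--
-- def _triangular_reading(n):
--     # The power-of-two construction: page v is placed at triangular index T(v-1) mod n.
--     pages = [0] * n
--     for v in range(1, n + 1):
--         pages[v * (v - 1) // 2 % n] = v
--     return pages
--
--
-- def _zigzag_reading(n):
--     # The even-length construction: odd countdown in the first half, even countdown shifted by one.
--     half = [n - (2 * i + 1) for i in range(n // 2)]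
--     return half + [x + 1 for x in half]
--
--
-- def iszapreadable(page_number_list):
--     n = len(page_number_list)
--     if n % 2 != 0:
--         return False
--     if math.log2(n).is_integer() and page_number_list == _triangular_reading(n):
--         return True
--     return page_number_list == _zigzag_reading(n)
-- ===== Notes on version B (the rewrite author's own statement) =====
-- stated objective: alternative
-- what changed: A verifies the input in place with two stateful while-loops (index walking, next-page counter, stop flag); B instead CONSTRUCTS the two canonical zap-readable page lists of length n (placing page v at triangular index v*(v-1)//2 % n in a fresh array, and concatenating two arithmetic half-lists) and tests whole-list equality against the input.
import Mathlib
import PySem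

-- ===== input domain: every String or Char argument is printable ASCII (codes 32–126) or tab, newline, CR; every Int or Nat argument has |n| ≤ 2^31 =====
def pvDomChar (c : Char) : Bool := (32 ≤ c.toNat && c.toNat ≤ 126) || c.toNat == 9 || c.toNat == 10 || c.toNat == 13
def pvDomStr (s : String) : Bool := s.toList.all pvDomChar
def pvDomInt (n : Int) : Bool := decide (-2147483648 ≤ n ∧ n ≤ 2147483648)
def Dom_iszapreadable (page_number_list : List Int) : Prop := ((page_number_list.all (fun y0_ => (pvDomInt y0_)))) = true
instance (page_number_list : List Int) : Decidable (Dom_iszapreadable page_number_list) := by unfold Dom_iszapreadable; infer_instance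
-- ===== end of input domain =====

-- B replaces A's two verifying while-loops by a generate-and-compare algorithm: it CONSTRUCTS the
-- two canonical zap-readable page lists of length n (placement into a fresh array for the
-- power-of-two pattern; two arithmetic half-lists for the even pattern) and tests list equality
-- (objective: alternative; return value only — neither program mutates its argument).

-- ===== PORT A =====
-- math.log2(n).is_integer() on a list length: true iff n is a power of two
-- (float log2 is exact on powers of two and non-integral on every other feasible length).
def log2IsInteger (n : Nat) : Bool := n != 0 && 2 ^ Nat.log2 n == n

-- A's first while loop: `next ≤ n and not stop`, stop becomes an early `false` return.
def zapLoop1 (l : List Int) (n : Int) (idx next : Int) : Bool :=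
  if h : next ≤ n then
    if ((PySem.List.pyGet? l idx).getD 0) == next then
      zapLoop1 l n (PySem.Int.mod (idx + next) n) (next + 1)
    else false
  else true
termination_by (n + 1 - next).toNat
decreasing_by omega

-- A's second while loop: idx walks 0,1,…, so `idx != len` is `idx < len`.
def zapLoop2 (l : List Int) (n : Int) (idx : Int) : Bool :=
  if h : idx < n then
    -- n is even here, so the float comparison `idx < n/2` is `2*idx < n`,
    -- and `n - (idx - n/2)*2` is integer-valued.
    if (if 2 * idx < n then ((PySem.List.pyGet? l idx).getD 0) == n - (idx * 2 + 1)
        else ((PySem.List.pyGet? l idx).getD 0) == n - (idx - PySem.Int.floordiv n 2) * 2) then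
      zapLoop2 l n (idx + 1)
    else false
  else true
termination_by (n - idx).toNat
decreasing_by omega

def iszapreadable (page_number_list : List Int) : Bool :=
  if PySem.Int.mod (page_number_list.length : Int) 2 != 0 then false
  else if log2IsInteger page_number_list.length &&
          zapLoop1 page_number_list (page_number_list.length : Int) 0 1 then true
  else if PySem.Int.mod (page_number_list.length : Int) 2 == 0 then
    (if zapLoop2 page_number_list (page_number_list.length : Int) 0 then true else false)
  else false

-- ===== PORT B =====
-- pages[idx] = v with idx = T(v-1) % n; pySetD is exact here (idx = mod of positive n is in range).
def triStep (n : Int) (pages : List Int) (v : Int) : List Int :=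
  PySem.List.pySetD pages (PySem.Int.mod (PySem.Int.floordiv (v * (v - 1)) 2) n) v

-- `[0] * n` is replicate n.toNat (exact: n = len ≥ 0); the for-loop is a foldl over range(1, n+1).
def triangularReading (n : Int) : List Int :=
  (PySem.List.pyRange 1 (n + 1) 1).foldl (triStep n) (List.replicate n.toNat 0)

def zigzagReading (n : Int) : List Int :=
  let half := (PySem.List.pyRange 0 (PySem.Int.floordiv n 2) 1).map (fun i => n - (2 * i + 1))
  half ++ half.map (fun x => x + 1)

def iszapreadable_alt (page_number_list : List Int) : Bool :=
  let n : Int := (page_number_list.length : Int)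
  if PySem.Int.mod n 2 != 0 then false
  else if log2IsInteger page_number_list.length && (page_number_list == triangularReading n) then true
  else page_number_list == zigzagReading n

-- ===== PRECONDITION & SPEC =====
-- Pre_ excludes only the empty list, on which A (and B) raise ValueError at math.log2(0).
def Pre_iszapreadable (page_number_list : List Int) : Prop := page_number_list ≠ []
instance (page_number_list : List Int) : Decidable (Pre_iszapreadable page_number_list) := by
  unfold Pre_iszapreadable; infer_instance

def pvWitness_iszapreadable : List Int := [1, 0]

def Spec_iszapreadable (page_number_list : List Int) (out : Bool) : Prop := out = iszapreadable_alt page_number_list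
instance (page_number_list : List Int) (out : Bool) : Decidable (Spec_iszapreadable page_number_list out) := by unfold Spec_iszapreadable; infer_instance

-- ===== CLAIM =====
def Claim_equal_iszapreadable : Prop := ∀ (page_number_list : List Int), Dom_iszapreadable page_number_list → Pre_iszapreadable page_number_list → Spec_iszapreadable page_number_list (iszapreadable page_number_list)

-- ===== LEMMAS AND PROOFS =====

-- The Nat-valued triangular placement index of page v in a list of length n.
def triIdx (n v : Int) : Nat := (PySem.Int.mod (PySem.Int.floordiv (v * (v - 1)) 2) n).toNat

theorem triIdx_lt (n : Int) (hn : 0 < n) (v : Int) : triIdx n v < n.toNat := by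
  have h1 := PySem.Int.mod_nonneg (PySem.Int.floordiv (v * (v - 1)) 2) hn
  have h2 := PySem.Int.mod_lt (PySem.Int.floordiv (v * (v - 1)) 2) hn
  unfold triIdx; omega

theorem triIdx_cast (n : Int) (hn : 0 < n) (v : Int) :
    (triIdx n v : Int) = PySem.Int.mod (PySem.Int.floordiv (v * (v - 1)) 2) n := by
  have h1 := PySem.Int.mod_nonneg (PySem.Int.floordiv (v * (v - 1)) 2) hn
  unfold triIdx; omega

-- Triangular indices are pairwise distinct when n is a power of two (parity argument on
-- 2n ∣ (b-a)(a+b-1): exactly one factor is even and both are too small for 2^(k+1)).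
theorem triIdx_inj (k : Nat) (n : Int) (hnk : n = ((2 ^ k : Nat) : Int))
    {a b : Int} (ha : 1 ≤ a) (hab : a < b) (hb : b ≤ n) : triIdx n a ≠ triIdx n b := by
  have hkn : ((2 ^ k : Nat) : Int) = n := hnk.symm
  have hn : 0 < n := by
    have : 0 < (2 ^ k : Nat) := Nat.two_pow_pos k
    omega
  intro hEq
  have hmodeq : PySem.Int.mod (PySem.Int.floordiv (a * (a - 1)) 2) n
      = PySem.Int.mod (PySem.Int.floordiv (b * (b - 1)) 2) n := by
    have h1 := PySem.Int.mod_nonneg (PySem.Int.floordiv (a * (a - 1)) 2) hn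
    have h2 := PySem.Int.mod_nonneg (PySem.Int.floordiv (b * (b - 1)) 2) hn
    unfold triIdx at hEq; omega
  obtain ⟨s, hs⟩ : ∃ s, a * (a - 1) = 2 * s := by
    obtain ⟨u, hu⟩ := (by simpa using Int.even_mul_succ_self (a - 1) : Even ((a - 1) * a))
    exact ⟨u, by rw [mul_comm]; omega⟩
  obtain ⟨t, ht⟩ : ∃ t, b * (b - 1) = 2 * t := by
    obtain ⟨u, hu⟩ := (by simpa using Int.even_mul_succ_self (b - 1) : Even ((b - 1) * b))
    exact ⟨u, by rw [mul_comm]; omega⟩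
  rw [hs, ht] at hmodeq
  have hfs : PySem.Int.floordiv (2 * s) 2 = s := by
    rw [PySem.Int.floordiv_eq_ediv_of_pos (by norm_num)]; omega
  have hft : PySem.Int.floordiv (2 * t) 2 = t := by
    rw [PySem.Int.floordiv_eq_ediv_of_pos (by norm_num)]; omega
  rw [hfs, hft, PySem.Int.mod_eq_emod_of_pos hn, PySem.Int.mod_eq_emod_of_pos hn] at hmodeq
  have hdvd : n ∣ t - s :=
    Int.dvd_of_emod_eq_zero (Int.emod_emod_of_dvd _ (dvd_refl n) ▸
      (Int.emod_eq_emod_iff_emod_sub_eq_zero.mp hmodeq.symm))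
  have key : ((2 ^ (k + 1) : Nat) : Int) ∣ (b - a) * (a + b - 1) := by
    obtain ⟨c, hc⟩ := hdvd
    refine ⟨c, ?_⟩
    have expand : (b - a) * (a + b - 1) = b * (b - 1) - a * (a - 1) := by ring
    have h2n : ((2 ^ (k + 1) : Nat) : Int) = 2 * n := by rw [hnk]; push_cast; ring
    rw [expand, hs, ht, h2n, show 2 * t - 2 * s = 2 * (t - s) from by ring, hc]
    ring
  have hD : ((b - a).toNat : Int) = b - a := by omega
  have hM : ((a + b - 1).toNat : Int) = a + b - 1 := by omega
  have keyN : 2 ^ (k + 1) ∣ (b - a).toNat * (a + b - 1).toNat := by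
    have : ((2 ^ (k + 1) : Nat) : Int) ∣ (((b - a).toNat * (a + b - 1).toNat : Nat) : Int) := by
      push_cast
      rw [hD, hM]
      exact key
    exact_mod_cast this
  have hpow : (2 : Nat) ^ (k + 1) = 2 * 2 ^ k := by ring
  rcases Nat.even_or_odd (b - a).toNat with hDe | hDo
  · have hModd : ¬ 2 ∣ (a + b - 1).toNat := by
      obtain ⟨u, hu⟩ := hDe
      rintro ⟨w, hw⟩
      omega
    have hcop : Nat.Coprime (2 ^ (k + 1)) ((a + b - 1).toNat) :=
      Nat.Coprime.pow_left _ ((Nat.prime_two.coprime_iff_not_dvd).mpr hModd)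
    have hdvdD := Nat.Coprime.dvd_of_dvd_mul_right hcop keyN
    have hle := Nat.le_of_dvd (by omega) hdvdD
    omega
  · have hDodd : ¬ 2 ∣ (b - a).toNat := by
      obtain ⟨u, hu⟩ := hDo
      rintro ⟨w, hw⟩
      omega
    have hcop : Nat.Coprime (2 ^ (k + 1)) ((b - a).toNat) :=
      Nat.Coprime.pow_left _ ((Nat.prime_two.coprime_iff_not_dvd).mpr hDodd)
    have hdvdM := Nat.Coprime.dvd_of_dvd_mul_left hcop keyN
    have hle := Nat.le_of_dvd (by omega) hdvdM
    omega

-- and therefore hit every position: the placement is a bijection onto range n.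
theorem triIdx_surj (k : Nat) (n : Int) (hnk : n = ((2 ^ k : Nat) : Int))
    (j : Nat) (hj : j < n.toNat) : ∃ v : Int, 1 ≤ v ∧ v ≤ n ∧ triIdx n v = j := by
  have hkn : ((2 ^ k : Nat) : Int) = n := hnk.symm
  have hn : 0 < n := by
    have : 0 < (2 ^ k : Nat) := Nat.two_pow_pos k
    omega
  have hinjOn : Set.InjOn (triIdx n) (Finset.Icc (1 : ℤ) n) := by
    intro a ha b hb hEq
    simp only [Finset.coe_Icc, Set.mem_Icc] at ha hb
    by_contra hne
    rcases lt_or_gt_of_ne hne with h | h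
    · exact triIdx_inj k n hnk ha.1 h hb.2 hEq
    · exact triIdx_inj k n hnk hb.1 h ha.2 hEq.symm
  have hcard : (Finset.Icc (1 : ℤ) n).card = n.toNat := by
    rw [Int.card_Icc]; omega
  have hsub : (Finset.Icc (1 : ℤ) n).image (triIdx n) ⊆ Finset.range n.toNat := by
    intro x hx
    obtain ⟨v, hv, hfv⟩ := Finset.mem_image.mp hx
    exact Finset.mem_range.mpr (hfv ▸ triIdx_lt n hn v)
  have heq : (Finset.Icc (1 : ℤ) n).image (triIdx n) = Finset.range n.toNat :=
    Finset.eq_of_subset_of_card_le hsub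
      (by rw [Finset.card_image_of_injOn hinjOn, hcard, Finset.card_range])
  have hjmem : j ∈ (Finset.Icc (1 : ℤ) n).image (triIdx n) := by
    rw [heq]; exact Finset.mem_range.mpr hj
  obtain ⟨v, hv, hfv⟩ := Finset.mem_image.mp hjmem
  obtain ⟨h1, h2⟩ := Finset.mem_Icc.mp hv
  exact ⟨v, h1, h2, hfv⟩

theorem length_triFold (n : Int) (vs : List Int) (init : List Int) :
    (vs.foldl (triStep n) init).length = init.length := by
  induction vs generalizing init with
  | nil => rfl
  | cons w tl ih => simp [List.foldl_cons, ih, triStep, PySem.List.length_pySetD]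

theorem triFold_get_of_notmem (n : Int) (hn : 0 < n) (vs init : List Int) (j : Nat)
    (h : ∀ v ∈ vs, triIdx n v ≠ j) :
    (vs.foldl (triStep n) init)[j]? = init[j]? := by
  induction vs generalizing init with
  | nil => rfl
  | cons w tl ih =>
      rw [List.foldl_cons, ih _ (fun v hv => h v (List.mem_cons_of_mem _ hv))]
      show (PySem.List.pySetD init _ w)[j]? = init[j]?
      rw [PySem.List.pySetD_of_nonneg init w (PySem.Int.mod_nonneg _ hn)]
      exact List.getElem?_set_ne (h w (List.mem_cons_self))

theorem triFold_get_self (n : Int) (hn : 0 < n) (vs : List Int) (v : Int)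
    (hinj : ∀ w ∈ vs, triIdx n w = triIdx n v → w = v) :
    ∀ init : List Int, v ∈ vs → triIdx n v < init.length →
      (vs.foldl (triStep n) init)[triIdx n v]? = some v := by
  induction vs with
  | nil => intro _ hv; exact absurd hv (List.not_mem_nil)
  | cons w tl ih =>
      intro init hv hlen
      rw [List.foldl_cons]
      by_cases hvtl : v ∈ tl
      · exact ih (fun w' hw' => hinj w' (List.mem_cons_of_mem _ hw')) _ hvtl
          (by rw [show (triStep n init w).length = init.length from by
                simp [triStep, PySem.List.length_pySetD]]; exact hlen)
      · have hwv : w = v := by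
          rcases List.mem_cons.mp hv with h | h
          · exact h.symm
          · exact absurd h hvtl
        subst hwv
        rw [triFold_get_of_notmem n hn tl _ _
          (fun u hu hcontra => hvtl (by rwa [hinj u (List.mem_cons_of_mem _ hu) hcontra] at hu))]
        show (PySem.List.pySetD init _ w)[triIdx n w]? = some w
        rw [PySem.List.pySetD_of_nonneg init w (PySem.Int.mod_nonneg _ hn)]
        exact List.getElem?_set_self hlen

-- A's second loop computes B's all() over range(idx, n), given n even (n = 2*(n//2)).
theorem zapLoop2_eq (l : List Int) (n : Int)
    (hev : n = 2 * PySem.Int.floordiv n 2) :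
    ∀ idx : Int, zapLoop2 l n idx =
      ((PySem.List.pyRange idx n 1).all fun i =>
        ((PySem.List.pyGet? l i).getD 0) ==
          (if i < PySem.Int.floordiv n 2 then n - (2 * i + 1)
           else n - (i - PySem.Int.floordiv n 2) * 2)) := by
  intro idx
  generalize hk : (n - idx).toNat = k
  induction k generalizing idx with
  | zero =>
      rw [zapLoop2, dif_neg (by omega), PySem.List.pyRange_one]
      simp [Int.toNat_of_nonpos (by omega : n - idx ≤ 0)]
  | succ k ih =>
      have h : idx < n := by omega
      rw [zapLoop2, dif_pos h, PySem.List.pyRange_one_cons h, List.all_cons]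
      have hb : (if 2 * idx < n then ((PySem.List.pyGet? l idx).getD 0) == n - (idx * 2 + 1)
            else ((PySem.List.pyGet? l idx).getD 0) == n - (idx - PySem.Int.floordiv n 2) * 2)
          = (((PySem.List.pyGet? l idx).getD 0) ==
              (if idx < PySem.Int.floordiv n 2 then n - (2 * idx + 1)
               else n - (idx - PySem.Int.floordiv n 2) * 2)) := by
        by_cases hc : idx < PySem.Int.floordiv n 2
        · rw [if_pos (by omega), if_pos hc, mul_comm idx 2]
        · rw [if_neg (by omega), if_neg hc]
      rw [hb]
      cases hx : (((PySem.List.pyGet? l idx).getD 0) ==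
          (if idx < PySem.Int.floordiv n 2 then n - (2 * idx + 1)
           else n - (idx - PySem.Int.floordiv n 2) * 2)) with
      | false => simp
      | true => simp [ih (idx + 1) (by omega)]

-- A's first loop, started at the triangular index of `next`, computes the all() over
-- range(next, n+1) of the closed-form placement check.
theorem zapLoop1_eq (l : List Int) (n : Int) (hn : 0 < n) :
    ∀ next idx : Int, 1 ≤ next →
      idx = PySem.Int.mod (PySem.Int.floordiv (next * (next - 1)) 2) n →
      zapLoop1 l n idx next =
        ((PySem.List.pyRange next (n + 1) 1).all fun v =>
          ((PySem.List.pyGet? l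
              (PySem.Int.mod (PySem.Int.floordiv (v * (v - 1)) 2) n)).getD 0) == v) := by
  intro next idx h1 hidx
  generalize hk : (n + 1 - next).toNat = k
  induction k generalizing next idx with
  | zero =>
      rw [zapLoop1, dif_neg (by omega), PySem.List.pyRange_one]
      simp [Int.toNat_of_nonpos (by omega : n + 1 - next ≤ 0)]
  | succ k ih =>
      have h : next ≤ n := by omega
      rw [zapLoop1, dif_pos h, PySem.List.pyRange_one_cons (by omega : next < n + 1),
        List.all_cons, hidx]
      cases hx : (((PySem.List.pyGet? l
          (PySem.Int.mod (PySem.Int.floordiv (next * (next - 1)) 2) n)).getD 0) == next) with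
      | false => simp
      | true =>
          obtain ⟨t, ht⟩ : ∃ t, next * (next - 1) = 2 * t := by
            have he : Even ((next - 1) * next) := by
              simpa using Int.even_mul_succ_self (next - 1)
            obtain ⟨t, ht⟩ := he
            exact ⟨t, by rw [mul_comm]; omega⟩
          have hT : PySem.Int.floordiv (next * (next - 1)) 2 = t := by
            rw [ht, PySem.Int.floordiv_eq_ediv_of_pos (by omega)]; omega
          have hT' : PySem.Int.floordiv ((next + 1) * (next + 1 - 1)) 2 = t + next := by
            have h2 : (next + 1) * (next + 1 - 1) = 2 * (t + next) := by
              rw [show (next + 1) * (next + 1 - 1) = next * (next - 1) + 2 * next from by ring, ht]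
              ring
            rw [h2, PySem.Int.floordiv_eq_ediv_of_pos (by omega)]; omega
          have hinv : PySem.Int.mod (PySem.Int.mod (PySem.Int.floordiv (next * (next - 1)) 2) n + next) n
              = PySem.Int.mod (PySem.Int.floordiv ((next + 1) * (next + 1 - 1)) 2) n := by
            simp only [PySem.Int.mod_eq_emod_of_pos hn]
            rw [hT, hT', Int.emod_add_emod]
          simp only [if_pos, Bool.true_and]
          rw [hinv]
          exact ih (next + 1) _ (by omega) rfl (by omega)

-- In-range subscript: (pyGet? l i).getD 0 is l[i.toNat].
theorem pyGet_in_range (l : List Int) (i : Int) (h0 : 0 ≤ i) (h1 : i < (l.length : Int)) :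
    (PySem.List.pyGet? l i).getD 0 = l[i.toNat]'(by omega) := by
  have : (PySem.List.pyGet? l i).getD 0 = PySem.List.pyGetD l i 0 := by
    simp [PySem.List.pyGetD]
  rw [this, PySem.List.pyGetD_eq_getElem l 0 h0 h1]

-- Pattern 1 (power of two): A's verifying loop equals B's generate-and-compare.
theorem pattern1_eq (l : List Int) (k : Nat) (hnk : (l.length : Int) = ((2 ^ k : Nat) : Int)) :
    zapLoop1 l (l.length : Int) 0 1 = (l == triangularReading (l.length : Int)) := by
  set n : Int := (l.length : Int) with hdefn
  have hn : 0 < n := by have := Nat.two_pow_pos k; omega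
  have hstart : (0 : Int) = PySem.Int.mod (PySem.Int.floordiv (1 * (1 - 1)) 2) n := by
    norm_num [PySem.Int.mod_eq_emod_of_pos hn,
      PySem.Int.floordiv_eq_ediv_of_pos (show (0 : Int) < 2 by norm_num)]
  rw [zapLoop1_eq l n hn 1 0 le_rfl hstart]
  have hTlen : (triangularReading n).length = l.length := by
    simp only [triangularReading]
    rw [length_triFold, List.length_replicate]
    omega
  have hinjAll : ∀ v w : Int, 1 ≤ v → v ≤ n → 1 ≤ w → w ≤ n → triIdx n w = triIdx n v → w = v := by
    intro v w hv1 hv2 hw1 hw2 hEq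
    by_contra hne
    rcases lt_or_gt_of_ne hne with hlt | hlt
    · exact triIdx_inj k n hnk hw1 hlt hv2 hEq
    · exact triIdx_inj k n hnk hv1 hlt hw2 hEq.symm
  have hTget : ∀ v : Int, 1 ≤ v → v ≤ n → (triangularReading n)[triIdx n v]? = some v := by
    intro v hv1 hv2
    simp only [triangularReading]
    apply triFold_get_self n hn _ v
    · intro w hw hEq
      obtain ⟨hw1, hw2⟩ := PySem.List.mem_pyRange_one.mp hw
      exact hinjAll v w hv1 hv2 hw1 (by omega) hEq
    · exact PySem.List.mem_pyRange_one.mpr ⟨hv1, by omega⟩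
    · rw [List.length_replicate]
      exact triIdx_lt n hn v
  apply Bool.coe_iff_coe.mp
  rw [List.all_eq_true, beq_iff_eq]
  constructor
  · intro hall
    apply List.ext_getElem (by omega)
    intro j hjl hjT
    obtain ⟨v, hv1, hv2, hvj⟩ := triIdx_surj k n hnk j (by omega)
    have hmem : v ∈ PySem.List.pyRange 1 (n + 1) 1 :=
      PySem.List.mem_pyRange_one.mpr ⟨hv1, by omega⟩
    have hchk := hall _ hmem
    rw [← triIdx_cast n hn v,
      pyGet_in_range l _ (by omega) (by have := triIdx_lt n hn v; omega)] at hchk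
    have hval := beq_iff_eq.mp hchk
    have htn : ((triIdx n v : Int)).toNat = j := by omega
    simp only [htn] at hval
    have hTv := hTget v hv1 hv2
    rw [hvj, List.getElem?_eq_getElem hjT] at hTv
    rw [hval, Option.some.inj hTv]
  · intro hlT v hv
    obtain ⟨hv1, hvn⟩ := PySem.List.mem_pyRange_one.mp hv
    rw [← triIdx_cast n hn v,
      pyGet_in_range l _ (by omega) (by have := triIdx_lt n hn v; omega)]
    apply beq_iff_eq.mpr
    have hTv := hTget v hv1 (by omega)
    rw [List.getElem?_eq_getElem (by have := triIdx_lt n hn v; omega :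
      triIdx n v < (triangularReading n).length)] at hTv
    have hval := Option.some.inj hTv
    simp only [Int.toNat_natCast]
    exact (List.getElem_of_eq hlT _).trans hval

-- Pattern 2 (even length): A's verifying loop equals B's generate-and-compare.
theorem pattern2_eq (l : List Int) (hev : (l.length : Int) = 2 * PySem.Int.floordiv (l.length : Int) 2) :
    zapLoop2 l (l.length : Int) 0 = (l == zigzagReading (l.length : Int)) := by
  rw [zapLoop2_eq l _ hev 0]
  set n : Int := (l.length : Int) with hdefn
  set h : Int := PySem.Int.floordiv n 2 with hdefh
  have hh0 : 0 ≤ h := by omega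
  have hZlen : (zigzagReading n).length = l.length := by
    simp only [zigzagReading]
    rw [← hdefh]
    simp only [List.length_append, List.length_map, PySem.List.length_pyRange_one]
    omega
  have hZget : ∀ j : Nat, j < l.length →
      (zigzagReading n)[j]? = some (if (j : Int) < h then n - (2 * (j : Int) + 1)
        else n - ((j : Int) - h) * 2) := by
    intro j hj
    simp only [zigzagReading]
    rw [← hdefh]
    have hlenhalf : (List.map (fun i => n - (2 * i + 1)) (PySem.List.pyRange 0 h 1)).length = h.toNat := by
      rw [List.length_map, PySem.List.length_pyRange_one]; omega
    by_cases hcase : j < h.toNat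
    · rw [List.getElem?_append_left (by omega), List.getElem?_map,
        PySem.List.getElem?_pyRange_one, if_pos (by omega), if_pos (by omega)]
      simp only [Option.map_some]
      congr 1
      ring
    · rw [List.getElem?_append_right (by omega), List.getElem?_map, List.getElem?_map,
        PySem.List.getElem?_pyRange_one, if_pos (by omega), if_neg (by omega)]
      simp only [Option.map_some]
      congr 1
      rw [hlenhalf]
      have : ((j - h.toNat : Nat) : Int) = (j : Int) - h := by omega
      rw [this]
      ring
  apply Bool.coe_iff_coe.mp
  rw [List.all_eq_true, beq_iff_eq]
  constructor
  · intro hall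
    apply List.ext_getElem (by omega)
    intro j hjl hjZ
    have hmem : ((j : Int)) ∈ PySem.List.pyRange 0 n 1 :=
      PySem.List.mem_pyRange_one.mpr ⟨by omega, by omega⟩
    have hchk := hall _ hmem
    rw [pyGet_in_range l (j : Int) (by omega) (by omega)] at hchk
    have hval := beq_iff_eq.mp hchk
    have := hZget j hjl
    rw [List.getElem?_eq_getElem hjZ] at this
    have hZval := Option.some.inj this
    rw [hZval]
    simpa using hval
  · intro hlZ i hi
    obtain ⟨hi0, hin⟩ := PySem.List.mem_pyRange_one.mp hi
    rw [pyGet_in_range l i hi0 hin]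
    apply beq_iff_eq.mpr
    have hget : l[i.toNat]'(by omega) = (zigzagReading n)[i.toNat]'(by omega) :=
      List.getElem_of_eq hlZ _
    have := hZget i.toNat (by omega)
    rw [List.getElem?_eq_getElem (by omega : i.toNat < (zigzagReading n).length)] at this
    rw [hget, Option.some.inj this]
    have hc : ((i.toNat : Nat) : Int) = i := by omega
    rw [hc]

-- ===== VERDICT =====
theorem iszapreadable_spec : Claim_equal_iszapreadable := by
  intro l _ hPre
  unfold Spec_iszapreadable iszapreadable iszapreadable_alt
  have hn : 0 < (l.length : Int) := by
    have := List.length_pos_of_ne_nil hPre; omega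
  by_cases hm : PySem.Int.mod (l.length : Int) 2 = 0
  · have hev : (l.length : Int) = 2 * PySem.Int.floordiv (l.length : Int) 2 := by
      have := PySem.Int.floordiv_mul_add_mod (l.length : Int) 2
      omega
    have hm1 : ((PySem.Int.mod (l.length : Int) 2 != 0) : Bool) = false :=
      bne_eq_false_iff_eq.mpr hm
    have hm2 : ((PySem.Int.mod (l.length : Int) 2 == 0) : Bool) = true := beq_iff_eq.mpr hm
    simp only [hm1, hm2, Bool.false_eq_true, if_false, if_true]
    rw [pattern2_eq l hev]
    have hiff : ∀ b : Bool, (if b = true then true else false) = b := by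
      intro b; cases b <;> rfl
    cases hp : log2IsInteger l.length with
    | false =>
        simp only [Bool.false_and, Bool.false_eq_true, if_false]
        exact hiff _
    | true =>
        have hpow : (l.length : Int) = ((2 ^ Nat.log2 l.length : Nat) : Int) := by
          have h := (Bool.and_eq_true _ _).mp hp
          have := beq_iff_eq.mp h.2
          exact_mod_cast (congrArg (fun m => ((m : Nat) : Int)) this).symm
        rw [pattern1_eq l (Nat.log2 l.length) hpow]
        cases hq : (l == triangularReading (l.length : Int)) with
        | true => simp
        | false =>
            simp only [Bool.and_false, Bool.false_eq_true, if_false]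
            exact hiff _
  · have hm1 : ((PySem.Int.mod (l.length : Int) 2 != 0) : Bool) = true := bne_iff_ne.mpr hm
    simp only [hm1, if_true]
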